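-- pv_equiv track=rewrite | github.com/AZNR/AutoTuner | zero_crossing_pitch_detection.py | get_zero_crossings
-- ===== SOURCE A (Python) =====
-- def sign(x):
-- 	return -1 if x < 0 else 1
--
-- def get_zero_crossings(signal, frame_size):
-- 	zero_crossings = []
-- 	for i in range(len(signal) // frame_size):
-- 		zero_crossing = 0
-- 		for j in range(1, frame_size):
-- 			if sign(signal[j + i * frame_size]) * sign(signal[j - 1 + i * frame_size]) == -1:
-- 				zero_crossing += 1
-- 		zero_crossings.append(zero_crossing)
--
-- 	return zero_crossings
-- ===== SOURCE B (Python) =====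
-- def get_zero_crossings(samples, frame_size):
--     n = len(samples)
--     # prefix sums of the global sign-transition indicator (0 treated as positive)
--     P = [0]
--     s = 0
--     for k in range(1, n):
--         if (samples[k] < 0) != (samples[k - 1] < 0):
--             s += 1
--         P.append(s)
--     return [P[i * frame_size + frame_size - 1] - P[i * frame_size]
--             for i in range(n // frame_size)]
-- ===== Notes on version B (the rewrite author's own statement) =====
-- stated objective: alternative
-- what changed: Replaces the nested per-frame loop calling sign() on each pair with a single global pass building prefix sums of a sign-transition indicator; each frame's count is then one prefix-sum subtraction P[i*fs+fs-1]-P[i*fs], which drops the cross-frame boundary transition exactly as A does.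
import Mathlib
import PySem

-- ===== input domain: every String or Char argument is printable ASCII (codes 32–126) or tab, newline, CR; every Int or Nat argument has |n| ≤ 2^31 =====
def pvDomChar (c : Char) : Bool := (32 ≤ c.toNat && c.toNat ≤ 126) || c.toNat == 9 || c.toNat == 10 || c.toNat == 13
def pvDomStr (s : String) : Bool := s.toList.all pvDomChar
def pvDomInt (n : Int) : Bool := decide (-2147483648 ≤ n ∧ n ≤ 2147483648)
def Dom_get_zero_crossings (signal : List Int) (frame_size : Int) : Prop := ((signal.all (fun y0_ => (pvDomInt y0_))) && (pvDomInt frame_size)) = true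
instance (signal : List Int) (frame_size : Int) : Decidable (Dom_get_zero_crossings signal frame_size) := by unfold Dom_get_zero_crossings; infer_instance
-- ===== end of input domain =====

-- B replaces the nested per-frame sign() loop by one global transition-indicator pass with
-- prefix sums; each frame count becomes a prefix-sum subtraction (alternative decomposition).

-- ===== PORT A =====
def pySign (x : Int) : Int := if x < 0 then -1 else 1

def get_zero_crossings (signal : List Int) (frame_size : Int) : List Int :=
  (PySem.List.pyRange 0 (PySem.Int.floordiv (signal.length : Int) frame_size) 1).foldl
    (fun zcs i =>
      let zc := (PySem.List.pyRange 1 frame_size 1).foldl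
        (fun z j =>
          if pySign (PySem.List.pyGetD signal (j + i * frame_size) 0) *
             pySign (PySem.List.pyGetD signal (j - 1 + i * frame_size) 0) == -1
          then z + 1 else z) 0
      zcs ++ [zc]) []

-- ===== PORT B =====
def get_zero_crossings_alt (signal : List Int) (frame_size : Int) : List Int :=
  let n : Int := (signal.length : Int)
  let st := (PySem.List.pyRange 1 n 1).foldl
    (fun (st : List Int × Int) k =>
      let s := if (decide (PySem.List.pyGetD signal k 0 < 0) !=
                   decide (PySem.List.pyGetD signal (k - 1) 0 < 0))
               then st.2 + 1 else st.2
      (st.1 ++ [s], s))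
    ([0], 0)
  (PySem.List.pyRange 0 (PySem.Int.floordiv n frame_size) 1).map
    (fun i => PySem.List.pyGetD st.1 (i * frame_size + frame_size - 1) 0
            - PySem.List.pyGetD st.1 (i * frame_size) 0)

-- ===== PRECONDITION & SPEC =====
-- frame_size = 0 makes the Python A raise ZeroDivisionError (len(signal) // frame_size); excluded.
def Pre_get_zero_crossings (signal : List Int) (frame_size : Int) : Prop := frame_size ≠ 0
instance (signal : List Int) (frame_size : Int) : Decidable (Pre_get_zero_crossings signal frame_size) := by unfold Pre_get_zero_crossings; infer_instance

def pvWitness_get_zero_crossings : List Int × Int := ([1, -1, 2, -3, -4, 5], 2)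

def Spec_get_zero_crossings (signal : List Int) (frame_size : Int) (out : List Int) : Prop := out = get_zero_crossings_alt signal frame_size
instance (signal : List Int) (frame_size : Int) (out : List Int) : Decidable (Spec_get_zero_crossings signal frame_size out) := by unfold Spec_get_zero_crossings; infer_instance

-- ===== CLAIM (what is proved, stated in full; the proofs are below) =====
def Claim_equal_get_zero_crossings : Prop := ∀ (signal : List Int) (frame_size : Int), Dom_get_zero_crossings signal frame_size → Pre_get_zero_crossings signal frame_size → Spec_get_zero_crossings signal frame_size (get_zero_crossings signal frame_size)

-- ===== LEMMAS AND PROOFS =====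

-- the per-position transition indicator B accumulates
def Tf (signal : List Int) (k : Int) : Int :=
  if (decide (PySem.List.pyGetD signal k 0 < 0) !=
      decide (PySem.List.pyGetD signal (k - 1) 0 < 0)) then 1 else 0

-- prefix sum of Tf over positions 1 .. m-1
def Sf (signal : List Int) (m : Int) : Int :=
  ((PySem.List.pyRange 1 m 1).map (Tf signal)).sum

lemma sign_cond (a b : Int) :
    (pySign a * pySign b == -1) = (decide (a < 0) != decide (b < 0)) := by
  unfold pySign
  by_cases ha : a < 0 <;> by_cases hb : b < 0 <;> simp [ha, hb]

lemma Sf_succ (signal : List Int) (m : Int) (h : 1 ≤ m) :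
    Sf signal (m + 1) = Sf signal m + Tf signal m := by
  unfold Sf
  rw [PySem.List.pyRange_one_succ_right h]
  simp

lemma loopP (signal : List Int) (m : Int) (h : 1 ≤ m) :
    (PySem.List.pyRange 1 m 1).foldl
      (fun (st : List Int × Int) k =>
        let s := if (decide (PySem.List.pyGetD signal k 0 < 0) !=
                     decide (PySem.List.pyGetD signal (k - 1) 0 < 0))
                 then st.2 + 1 else st.2
        (st.1 ++ [s], s))
      ([0], 0)
    = ((PySem.List.pyRange 1 (m + 1) 1).map (Sf signal), Sf signal m) := by
  induction m, h using Int.le_induction with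
  | base =>
      rw [PySem.List.pyRange_one_eq_nil (by omega)]
      rw [show (1:Int) + 1 = 2 by ring, show (PySem.List.pyRange 1 2 1) = [1] from PySem.List.pyRange_one_singleton 1]
      simp [Sf, PySem.List.pyRange_one_eq_nil]
  | succ m hm ih =>
      rw [PySem.List.pyRange_one_succ_right (by omega : (1:Int) ≤ m), List.foldl_append, ih]
      rw [PySem.List.pyRange_one_succ_right (by omega : (1:Int) ≤ m + 1)]
      simp only [List.foldl_cons, List.foldl_nil, List.map_append, List.map_cons, List.map_nil]
      rw [Sf_succ signal m hm]
      unfold Tf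
      by_cases h : PySem.List.pyGetD signal m 0 < 0 <;>
        by_cases h' : PySem.List.pyGetD signal (m - 1) 0 < 0 <;>
        simp [h, h']

-- Int-index version of pyGetD on a mapped range
lemma pyGetD_map_pyRange_one_int (f : Int → Int) (a b i d : Int)
    (h0 : 0 ≤ i) (h1 : i < b - a) :
    PySem.List.pyGetD ((PySem.List.pyRange a b 1).map f) i d = f (a + i) := by
  obtain ⟨k, rfl⟩ := Int.eq_ofNat_of_zero_le h0
  rw [PySem.List.pyGetD_map_pyRange_one f a b k d (by omega)]

-- sum over a shifted range
lemma sum_shift (signal : List Int) (c fs : Int) :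
    ((PySem.List.pyRange 1 fs 1).map (fun j => Tf signal (j + c))).sum
      = ((PySem.List.pyRange (c + 1) (c + fs) 1).map (Tf signal)).sum := by
  rw [PySem.List.pyRange_one 1 fs, PySem.List.pyRange_one (c + 1) (c + fs)]
  rw [show (c + fs - (c + 1)) = fs - 1 by ring]
  simp only [List.map_map]
  apply congrArg
  apply List.map_congr_left
  intro k _
  simp only [Function.comp_apply]
  ring_nf

lemma Sf_diff (signal : List Int) (a b : Int) (h1 : 1 ≤ a) (h2 : a ≤ b) :
    Sf signal b - Sf signal a = ((PySem.List.pyRange a b 1).map (Tf signal)).sum := by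
  unfold Sf
  rw [PySem.List.pyRange_one_append 1 a b h1 h2]
  simp

lemma fs_pos_of_frames (n m fs : Int) (hn : 0 ≤ n) (hfs : fs ≠ 0)
    (hm : m = PySem.Int.floordiv n fs) (hpos : 0 < m) : 0 < fs := by
  rcases lt_trichotomy fs 0 with h | h | h
  · exfalso
    have hmod := PySem.Int.mod_neg_bounds (a := n) (b := fs) h
    have heq := PySem.Int.floordiv_mul_add_mod n fs
    rw [← hm] at heq
    nlinarith
  · exact absurd h hfs
  · exact h

-- ===== VERDICT (by name: the statement is the Claim_ definition above) =====
theorem get_zero_crossings_spec : Claim_equal_get_zero_crossings := by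
  intro signal fs _dom hpre
  unfold Spec_get_zero_crossings get_zero_crossings get_zero_crossings_alt
  rw [PySem.List.foldl_append_singleton_eq_map]
  set n : Int := (signal.length : Int) with hn
  set m : Int := PySem.Int.floordiv n fs with hm
  by_cases hpos : 0 < m
  · -- at least one frame
    have hfs : 0 < fs := fs_pos_of_frames n m fs (by positivity) hpre hm.symm hpos
    have hmn : m * fs ≤ n := by
      rw [hm, ← PySem.Int.le_floordiv_iff_mul_le hfs]
    have hn1 : 1 ≤ n := by nlinarith
    simp only [loopP signal n hn1, List.nil_append]
    apply List.map_congr_left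
    intro i hi
    rw [PySem.List.mem_pyRange_one] at hi
    obtain ⟨hi0, him⟩ := hi
    -- index bounds for the two prefix-sum lookups
    have hb1 : (i + 1) * fs ≤ m * fs := by
      apply mul_le_mul_of_nonneg_right (by omega) (le_of_lt hfs)
    have hnn : 0 ≤ i * fs := mul_nonneg hi0 (le_of_lt hfs)
    rw [pyGetD_map_pyRange_one_int _ _ _ _ _ (by nlinarith) (by nlinarith),
        pyGetD_map_pyRange_one_int _ _ _ _ _ hnn (by nlinarith)]
    -- left side: the inner counting loop
    rw [PySem.List.foldl_if_add_one, zero_add, ← PySem.List.sum_map_ite_one_zero]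
    have hcond : ((PySem.List.pyRange 1 fs 1).map
        (fun j => if (pySign (PySem.List.pyGetD signal (j + i * fs) 0) *
                      pySign (PySem.List.pyGetD signal (j - 1 + i * fs) 0) == -1)
                  then (1:Int) else 0)) =
        (PySem.List.pyRange 1 fs 1).map (fun j => Tf signal (j + i * fs)) := by
      apply List.map_congr_left
      intro j _
      rw [sign_cond]
      unfold Tf
      rw [show j + i * fs - 1 = j - 1 + i * fs by ring]
    rw [hcond, sum_shift signal (i * fs) fs]
    have h1 : (1:Int) ≤ i * fs + 1 := by omega
    have h2 : i * fs + 1 ≤ i * fs + fs := by omega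
    rw [show (1:Int) + (i * fs + fs - 1) = i * fs + fs by ring,
        show (1:Int) + i * fs = i * fs + 1 by ring,
        ← Sf_diff signal (i * fs + 1) (i * fs + fs) h1 h2]
  · -- no frames: both sides are []
    have h0 : PySem.Int.floordiv n fs ≤ 0 := by rw [← hm]; omega
    simp only [hm, PySem.List.pyRange_one_eq_nil h0, List.map_nil, List.append_nil]
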